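-- pv_equiv track=rewrite | github.com/Shangtingli/movie-ratings-recommendations | lsh.py | minHashCombiner
-- ===== SOURCE A (Python) =====
-- def hash(i,movieId):
--     return (3 * movieId + 11*i ) % 100 + 1
--
-- def minHashCombiner(row):
--     userId = row[0]
--     hashes = []
--     for i,tup in enumerate(row[1]):
--         for j in range(50):
--             if i == 0:
--                 hashes.append(hash(j+1,tup[0]))
--             else:
--                 hashes[j] = min(hash(j+1,tup[0]),hashes[j])
--     return (userId,hashes)
-- ===== SOURCE B (Python) =====
-- def hash(i, movieId):
--     return (3 * movieId + 11 * i) % 100 + 1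
--
-- def minHashCombiner(row):
--     userId, movies = row
--     if not movies:
--         return (userId, [])
--     # hash(i, m) depends on m only through m % 100, so one pass records which
--     # of the 100 residues occur, then each signature entry is a min over <=100 residues.
--     present = [False] * 100
--     for t in movies:
--         present[t[0] % 100] = True
--     residues = [r for r in range(100) if present[r]]
--     return (userId, [min((3 * r + 11 * j) % 100 + 1 for r in residues) for j in range(1, 51)])
-- ===== Notes on version B (the rewrite author's own statement) =====
-- stated objective: faster
-- what changed: B replaces A's 50-wide running-min array updated for every movie by a single pass that records which residues movieId % 100 occur (hash depends only on that residue), then takes each of the 50 minima over the at most 100 distinct residues.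
import Mathlib
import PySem

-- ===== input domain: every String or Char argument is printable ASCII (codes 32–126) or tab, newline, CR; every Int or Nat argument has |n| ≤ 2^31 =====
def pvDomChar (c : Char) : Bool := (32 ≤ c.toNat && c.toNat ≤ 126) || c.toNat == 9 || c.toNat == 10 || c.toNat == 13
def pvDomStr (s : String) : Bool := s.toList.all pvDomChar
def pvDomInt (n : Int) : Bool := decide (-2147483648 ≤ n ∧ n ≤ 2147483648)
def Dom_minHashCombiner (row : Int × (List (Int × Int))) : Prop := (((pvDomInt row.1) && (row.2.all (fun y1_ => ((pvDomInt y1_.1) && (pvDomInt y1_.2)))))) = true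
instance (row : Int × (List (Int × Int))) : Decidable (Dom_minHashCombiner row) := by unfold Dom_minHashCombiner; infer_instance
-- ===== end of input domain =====

-- B exploits hash(i,m) depending on m only through m % 100: one pass records the occurring
-- residues in a 100-entry table, then each of the 50 minima ranges over <=100 residues
-- instead of all movies (faster in a timing run on large inputs).

-- hash(i, movieId) from the Python module (shared helper of both A and B)
def hashFn (i movieId : Int) : Int := PySem.Int.mod (3 * movieId + 11 * i) 100 + 1

-- ===== PORT A =====
def minHashCombiner (row : Int × (List (Int × Int))) : Int × List Int :=
  let hashes :=
    (PySem.List.enumerate row.2 0).foldl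
      (fun hashes it =>
        (PySem.List.pyRange 0 50 1).foldl
          (fun hs j =>
            if it.1 == 0 then hs ++ [hashFn (j + 1) it.2.1]
            else hs.set j.toNat (min (hashFn (j + 1) it.2.1) (PySem.List.pyGetD hs j 0)))
          hashes)
      []
  (row.1, hashes)

-- ===== PORT B =====
def minHashCombiner_alt (row : Int × (List (Int × Int))) : Int × List Int :=
  match row.2 with
  | [] => (row.1, [])
  | _ :: _ =>
      let present :=
        row.2.foldl (fun tbl u => tbl.set (PySem.Int.mod u.1 100).toNat true)
          (List.replicate 100 false)
      let residues :=
        (PySem.List.pyRange 0 100 1).filter (fun r => PySem.List.pyGetD present r false)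
      (row.1,
        (PySem.List.pyRange 1 51 1).map (fun j =>
          match residues.map (fun r => PySem.Int.mod (3 * r + 11 * j) 100 + 1) with
          | [] => 0   -- unreachable (row.2 ≠ [] makes residues nonempty); totality guard for Python's min
          | h :: tl => tl.foldl min h))

-- ===== PRECONDITION & SPEC =====
def Spec_minHashCombiner (row : Int × (List (Int × Int))) (out : Int × List Int) : Prop := out = minHashCombiner_alt row
instance (row : Int × (List (Int × Int))) (out : Int × List Int) : Decidable (Spec_minHashCombiner row out) := by unfold Spec_minHashCombiner; infer_instance

-- ===== CLAIM (what is proved, stated in full; the proofs are below) =====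
def Claim_equal_minHashCombiner : Prop := ∀ (row : Int × (List (Int × Int))), Dom_minHashCombiner row → Spec_minHashCombiner row (minHashCombiner row)

-- ===== LEMMAS AND PROOFS =====

-- ---- A-side: the fold over enumerate computes, per position j, the running min of the hashes ----

-- inner update loop: updating positions a .. b-1 of pre ++ suf is a mapIdx over suf
theorem updRange (m : Int) :
    ∀ (suf pre : List Int) (a b : Int), 0 ≤ a → pre.length = a.toNat → b = a + suf.length →
      (PySem.List.pyRange a b 1).foldl
          (fun hs j => hs.set j.toNat (min (hashFn (j + 1) m) (PySem.List.pyGetD hs j 0)))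
          (pre ++ suf)
        = pre ++ suf.mapIdx (fun k h => min (hashFn ((a + k) + 1) m) h) := by
  intro suf
  induction suf with
  | nil =>
      intro pre a b ha hlen hb
      have hba : b ≤ a := by simp at hb; omega
      simp [PySem.List.pyRange_one_eq_nil hba]
  | cons h t ih =>
      intro pre a b ha hlen hb
      have hlt : a < b := by simp only [List.length_cons] at hb; push_cast at hb; omega
      rw [PySem.List.pyRange_one_cons hlt]
      simp only [List.foldl_cons]
      have hget : PySem.List.pyGetD (pre ++ h :: t) a 0 = h := by
        rw [PySem.List.pyGetD_of_nonneg _ _ ha]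
        simp [List.getD_eq_getElem?_getD, hlen]
      have hset : (pre ++ h :: t).set a.toNat (min (hashFn (a + 1) m) h)
          = (pre ++ [min (hashFn (a + 1) m) h]) ++ t := by
        rw [List.set_append]
        simp [hlen]
      rw [hget, hset]
      rw [ih (pre ++ [min (hashFn (a + 1) m) h]) (a + 1) b (by omega)
            (by simp [hlen]; omega)
            (by simp only [List.length_cons] at hb; push_cast at hb ⊢; omega)]
      simp only [List.mapIdx_cons, List.append_assoc, List.singleton_append]
      congr 1
      congr 1
      · norm_num
      · congr 1
        funext i x
        congr 2
        push_cast
        ring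

-- mapIdx of a map over pyRange 0 n 1 is a map over the range
theorem mapIdx_map_pyRange (n : Int) (g : Int → Int) (F : Int → Int → Int) :
    ((PySem.List.pyRange 0 n 1).map g).mapIdx (fun k h => F ((0 : Int) + k) h)
      = (PySem.List.pyRange 0 n 1).map (fun j => F j (g j)) := by
  apply List.ext_getElem
  · simp
  · intro i h1 h2
    simp [List.getElem_mapIdx, PySem.List.getElem_pyRange_one]

-- outer loop over enumerate ts s with s ≥ 1: running min per position
theorem outerLoop (ts : List (Int × Int)) :
    ∀ (s : Int) (g : Int → Int), 1 ≤ s →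
      (PySem.List.enumerate ts s).foldl
          (fun hashes it =>
            (PySem.List.pyRange 0 50 1).foldl
              (fun hs j =>
                if it.1 == 0 then hs ++ [hashFn (j + 1) it.2.1]
                else hs.set j.toNat (min (hashFn (j + 1) it.2.1) (PySem.List.pyGetD hs j 0)))
              hashes)
          ((PySem.List.pyRange 0 50 1).map g)
        = (PySem.List.pyRange 0 50 1).map
            (fun j => (ts.map (fun u => hashFn (j + 1) u.1)).foldl min (g j)) := by
  induction ts with
  | nil => intro s g hs; simp [PySem.List.enumerate_nil]
  | cons u tl ih =>
      intro s g hs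
      rw [PySem.List.enumerate_cons]
      simp only [List.foldl_cons]
      have hne : (s == (0 : Int)) = false := by
        simp; omega
      simp only [hne, Bool.false_eq_true, if_false]
      have h50 : (50 : Int) = 0 + (((PySem.List.pyRange 0 50 1).map g).length : Int) := by
        simp [PySem.List.length_pyRange_one]
      have hupd := updRange u.1 ((PySem.List.pyRange 0 50 1).map g) [] 0 50 le_rfl rfl h50
      simp only [List.nil_append] at hupd
      rw [hupd, mapIdx_map_pyRange (50 : Int) g (fun j h => min (hashFn (j + 1) u.1) h)]
      rw [ih (s + 1) (fun j => min (hashFn (j + 1) u.1) (g j)) (by omega)]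
      apply List.map_congr_left
      intro j _
      rw [List.map_cons, List.foldl_cons, min_comm]

-- the two index conventions for the 50 hashes agree
theorem range_shift (F : Int → Int) :
    (PySem.List.pyRange 0 50 1).map (fun j => F (j + 1))
      = (PySem.List.pyRange 1 51 1).map F := by
  apply List.ext_getElem
  · simp [PySem.List.length_pyRange_one]
  · intro i h1 h2
    simp [PySem.List.getElem_pyRange_one]
    congr 1
    omega

-- ---- B-side: the residue table records exactly the residues of the movies ----

-- Python's % with the positive literal divisor 100 is Int.emod
theorem pmod100 (a : Int) : PySem.Int.mod a 100 = a % 100 :=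
  PySem.Int.mod_eq_emod_of_pos (by norm_num)

-- getD after a set at an in-range index
theorem getD_set_bool (tbl : List Bool) (i k : Nat) (hi : i < tbl.length) :
    (tbl.set i true).getD k false = if i = k then true else tbl.getD k false := by
  rw [List.getD_eq_getElem?_getD, List.getD_eq_getElem?_getD, List.getElem?_set]
  split_ifs <;> simp_all

-- getD of the all-false table
theorem getD_replicate_false (n k : Nat) : (List.replicate n false).getD k false = false := by
  rw [List.getD_eq_getElem?_getD, List.getElem?_replicate]
  split_ifs <;> rfl

-- characterization of the presence table built by B's first pass
theorem table_getD (ms : List (Int × Int)) :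
    ∀ (tbl : List Bool) (k : Nat), tbl.length = 100 → k < 100 →
      (ms.foldl (fun t u => t.set (u.1 % 100).toNat true) tbl).getD k false
        = (tbl.getD k false || ms.any (fun u => (u.1 % 100).toNat == k)) := by
  induction ms with
  | nil => intro tbl k _ _; simp
  | cons u tl ih =>
      intro tbl k hlen hk
      have hm0 : 0 ≤ u.1 % 100 := Int.emod_nonneg u.1 (by norm_num)
      have hm1 : u.1 % 100 < 100 := Int.emod_lt_of_pos u.1 (by norm_num)
      simp only [List.foldl_cons, List.any_cons]
      rw [ih _ k (by simp [hlen]) hk]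
      rw [getD_set_bool tbl _ k (by omega)]
      by_cases hik : (u.1 % 100).toNat = k
      · simp [hik]
      · have hb : ((u.1 % 100).toNat == k) = false := beq_eq_false_iff_ne.mpr hik
        simp [hik, hb]

-- the fold of min over a list yields an element of the list (with its seed)
theorem foldl_min_mem : ∀ (l : List Int) (a : Int), l.foldl min a ∈ a :: l := by
  intro l
  induction l with
  | nil => intro a; simp
  | cons h t ih =>
      intro a
      simp only [List.foldl_cons]
      rcases List.mem_cons.1 (ih (min a h)) with hmem | hmem
      · rcases min_choice a h with he | he
        · rw [hmem, he]; simp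
        · rw [hmem, he]; simp
      · simp [List.mem_cons, hmem]

-- the fold of min is a lower bound of seed and elements
theorem foldl_min_le : ∀ (l : List Int) (a x : Int), x ∈ a :: l → l.foldl min a ≤ x := by
  intro l
  induction l with
  | nil => intro a x hx; simp at hx; simp [hx]
  | cons h t ih =>
      intro a x hx
      simp only [List.mem_cons] at hx
      simp only [List.foldl_cons]
      rcases hx with rfl | rfl | hx
      · exact le_trans (ih (min x h) (min x h) (by simp)) (min_le_left _ _)
      · exact le_trans (ih (min a x) (min a x) (by simp)) (min_le_right _ _)
      · exact ih _ _ (List.mem_cons_of_mem _ hx)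

-- two min-folds over lists with the same elements agree
theorem foldl_min_eq_of_mem_iff (l m : List Int) (a b : Int)
    (h : ∀ x, x ∈ a :: l ↔ x ∈ b :: m) : l.foldl min a = m.foldl min b := by
  apply le_antisymm
  · exact foldl_min_le _ _ _ ((h _).2 (foldl_min_mem m b))
  · exact foldl_min_le _ _ _ ((h _).1 (foldl_min_mem l a))

-- hash reads its movieId only modulo 100
theorem hashFn_mod (j m : Int) :
    (3 * (m % 100) + 11 * j) % 100 + 1 = hashFn j m := by
  unfold hashFn
  rw [pmod100]
  omega

-- membership in B's residue list = some movie has that residue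
theorem mem_residues (ms : List (Int × Int)) (r : Int) :
    (r ∈ (PySem.List.pyRange 0 100 1).filter
        (fun r => PySem.List.pyGetD
          (ms.foldl (fun t u => t.set ((u.1 % 100)).toNat true)
            (List.replicate 100 false)) r false))
      ↔ ∃ u ∈ ms, u.1 % 100 = r := by
  rw [List.mem_filter, PySem.List.mem_pyRange_one]
  constructor
  · rintro ⟨⟨hr0, hr100⟩, hget⟩
    rw [PySem.List.pyGetD_of_nonneg _ _ hr0] at hget
    rw [table_getD _ _ _ (by simp) (by omega)] at hget
    rw [getD_replicate_false] at hget
    simp only [Bool.false_or, List.any_eq_true, beq_iff_eq] at hget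
    obtain ⟨u, hu, hur⟩ := hget
    refine ⟨u, hu, ?_⟩
    have : 0 ≤ u.1 % 100 := Int.emod_nonneg u.1 (by norm_num)
    omega
  · rintro ⟨u, hu, hur⟩
    have h0 : 0 ≤ r := hur ▸ Int.emod_nonneg u.1 (by norm_num)
    have h100 : r < 100 := hur ▸ Int.emod_lt_of_pos u.1 (by norm_num)
    refine ⟨⟨h0, h100⟩, ?_⟩
    rw [PySem.List.pyGetD_of_nonneg _ _ h0]
    rw [table_getD _ _ _ (by simp) (by omega)]
    rw [getD_replicate_false]
    simp only [Bool.false_or, List.any_eq_true, beq_iff_eq]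
    exact ⟨u, hu, by omega⟩

-- per position j: A's min over all movies = B's min over the occurring residues
theorem per_index (t : Int × Int) (ts : List (Int × Int)) (j : Int) :
    (ts.map (fun u => hashFn j u.1)).foldl min (hashFn j t.1)
      = (match ((PySem.List.pyRange 0 100 1).filter
            (fun r => PySem.List.pyGetD
              ((t :: ts).foldl (fun tbl u => tbl.set (PySem.Int.mod u.1 100).toNat true)
                (List.replicate 100 false)) r false)).map
            (fun r => PySem.Int.mod (3 * r + 11 * j) 100 + 1) with
          | [] => 0
          | h :: tl => tl.foldl min h) := by
  simp only [pmod100]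
  have hmem : ∀ (x : Int),
      x ∈ (t :: ts).map (fun u => hashFn j u.1)
        ↔ x ∈ ((PySem.List.pyRange 0 100 1).filter
            (fun r => PySem.List.pyGetD
              ((t :: ts).foldl (fun tbl u => tbl.set ((u.1 % 100)).toNat true)
                (List.replicate 100 false)) r false)).map
            (fun r => (3 * r + 11 * j) % 100 + 1) := by
    intro x
    simp only [List.mem_map]
    constructor
    · rintro ⟨u, hu, rfl⟩
      exact ⟨u.1 % 100, (mem_residues _ _).2 ⟨u, hu, rfl⟩, hashFn_mod j u.1⟩
    · rintro ⟨r, hr, rfl⟩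
      obtain ⟨u, hu, rfl⟩ := (mem_residues _ _).1 hr
      exact ⟨u, hu, (hashFn_mod j u.1).symm⟩
  have hne : ((PySem.List.pyRange 0 100 1).filter
      (fun r => PySem.List.pyGetD
        ((t :: ts).foldl (fun tbl u => tbl.set ((u.1 % 100)).toNat true)
          (List.replicate 100 false)) r false)) ≠ [] := by
    intro hnil
    have := (mem_residues (t :: ts) (t.1 % 100)).2 ⟨t, by simp, rfl⟩
    rw [hnil] at this
    simp at this
  cases hres : ((PySem.List.pyRange 0 100 1).filter
      (fun r => PySem.List.pyGetD
        ((t :: ts).foldl (fun tbl u => tbl.set ((u.1 % 100)).toNat true)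
          (List.replicate 100 false)) r false)) with
  | nil => exact absurd hres hne
  | cons rh rt =>
      simp only [List.map_cons]
      apply foldl_min_eq_of_mem_iff
      intro x
      have := hmem x
      rw [hres] at this
      simpa using this

-- ===== VERDICT (by name: the statement is the Claim_ definition above) =====
theorem minHashCombiner_spec : Claim_equal_minHashCombiner := by
  intro row _
  unfold Spec_minHashCombiner minHashCombiner minHashCombiner_alt
  obtain ⟨uid, movies⟩ := row
  cases movies with
  | nil => simp [PySem.List.enumerate_nil]
  | cons t ts =>
      simp only [PySem.List.enumerate_cons, List.foldl_cons]
      have h0 : ((0 : Int) == (0 : Int)) = true := by decide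
      simp only [h0, if_true]
      rw [PySem.List.foldl_append_singleton_eq_map
            (f := fun j => hashFn (j + 1) t.1) (l := PySem.List.pyRange 0 50 1)]
      simp only [List.nil_append]
      rw [show (0 : Int) + 1 = 1 from by norm_num]
      rw [outerLoop ts 1 (fun j => hashFn (j + 1) t.1) le_rfl]
      rw [show (PySem.List.pyRange 0 50 1).map
            (fun j => (ts.map (fun u => hashFn (j + 1) u.1)).foldl min (hashFn (j + 1) t.1))
          = (PySem.List.pyRange 1 51 1).map
            (fun j => (ts.map (fun u => hashFn j u.1)).foldl min (hashFn j t.1)) from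
        range_shift (fun j => (ts.map (fun u => hashFn j u.1)).foldl min (hashFn j t.1))]
      refine Prod.ext rfl ?_
      simp only
      apply List.map_congr_left
      intro j _
      exact per_index t ts j
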